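-- pv_equiv track=rewrite | github.com/shadowflush/NLP_Practice | max-match/seg.py | backwardSeg
-- ===== SOURCE A (Python) =====
-- def backwardSeg(dict, sentence, wordMaxLength):
-- 	end =len(sentence)-1
-- 	outcome =[]
-- 	while end >=0:
-- 		for i in range(1,wordMaxLength+1)[::-1]:
-- 			if end -i+1 >=0 and (sentence[end-i+1:end+1] in dict) or i ==1:
-- 				outcome.append(sentence[end-i+1:end+1])
-- 				end -=i
-- 				break
-- 	outcome.reverse()
-- 	return outcome
-- ===== SOURCE B (Python) =====
-- def backwardSeg(dict, sentence, wordMaxLength):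
--     # trie of the reversed dictionary words, stored as flat node arrays
--     children = [{}]
--     terminal = [False]
--     for w in dict:
--         cur = 0
--         for c in reversed(w):
--             nxt = children[cur].get(c)
--             if nxt is None:
--                 children.append({})
--                 terminal.append(False)
--                 nxt = len(children) - 1
--                 children[cur][c] = nxt
--             cur = nxt
--         terminal[cur] = True
--     out = []
--     end = len(sentence) - 1
--     while end >= 0:
--         best = 1
--         cur = 0
--         i = 0
--         while i < wordMaxLength and end - i >= 0:
--             nxt = children[cur].get(sentence[end - i])
--             if nxt is None:
--                 break
--             cur = nxt
--             i += 1
--             if terminal[cur]: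
--                 best = i
--         out.append(sentence[end - best + 1:end + 1])
--         end -= best
--     out.reverse()
--     return out
-- ===== Notes on version B (the rewrite author's own statement) =====
-- stated objective: faster
-- what changed: B builds a trie of the reversed dictionary words once (flat node arrays) and finds the longest match at each position by a single backward walk through the trie, instead of A's per-position loop over every candidate length with a fresh slice and a linear 'in dict' list scan for each.
import Mathlib
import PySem

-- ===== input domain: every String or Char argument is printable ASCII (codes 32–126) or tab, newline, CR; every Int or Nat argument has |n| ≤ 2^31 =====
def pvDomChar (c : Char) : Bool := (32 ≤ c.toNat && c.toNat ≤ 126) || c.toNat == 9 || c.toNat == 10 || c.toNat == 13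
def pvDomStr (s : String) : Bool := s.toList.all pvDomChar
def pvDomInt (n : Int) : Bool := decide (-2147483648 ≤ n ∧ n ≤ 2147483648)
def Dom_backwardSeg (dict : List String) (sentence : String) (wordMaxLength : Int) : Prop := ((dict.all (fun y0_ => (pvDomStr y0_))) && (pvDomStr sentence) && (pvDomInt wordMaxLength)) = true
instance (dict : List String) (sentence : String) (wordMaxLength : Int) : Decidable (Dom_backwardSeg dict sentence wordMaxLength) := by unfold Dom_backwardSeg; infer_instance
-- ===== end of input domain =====

-- B replaces A's per-position scan over all candidate lengths (each slicing and doing a linear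
-- 'in dict' list scan) by a trie of the reversed dictionary words built once, walked backward
-- from each position while tracking the deepest terminal node.


-- ===== PORT A =====
-- sentence[lo:hi] as a String (the sentence is handled as its char list throughout)
def segSlice (s : List Char) (lo hi : Int) : String :=
  String.ofList (PySem.List.slice s (some lo) (some hi))

-- 'while end >= 0: for i in range(1, wML+1)[::-1]: if (end-i+1 >= 0 and s[end-i+1:end+1] in dict) or i == 1:
--    outcome.append(s[end-i+1:end+1]); end -= i; break'
-- (the for-with-break is the first hit of the scan = find?; fuel only makes the loop total —
--  when the inner scan finds nothing, Python repeats the empty for forever and so does each fuel step here)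
def aLoop (dict : List String) (s : List Char) (wML : Int) :
    Nat → Int → List String → List String
  | 0, _, outcome => outcome
  | fuel + 1, e, outcome =>
    if e ≥ 0 then
      match ((PySem.List.pyRange 1 (wML + 1) 1).reverse).find?
          (fun i => (decide (e - i + 1 ≥ 0) && decide (segSlice s (e - i + 1) (e + 1) ∈ dict)) || i == 1) with
      | some i => aLoop dict s wML fuel (e - i) (outcome ++ [segSlice s (e - i + 1) (e + 1)])
      | none => aLoop dict s wML fuel e outcome
    else outcome

def backwardSeg (dict : List String) (sentence : String) (wordMaxLength : Int) : List String :=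
  let s := sentence.toList
  (aLoop dict s wordMaxLength (s.length + 1) ((s.length : Int) - 1) []).reverse

-- ===== PORT B =====
-- trie node access: 'children[cur].get(c)' (the index cur is always in range when B runs it,
-- so the pyGetD default dict is never read)
def childGet (ch : List (PySem.Dict Char Int)) (cur : Int) (c : Char) : Option Int :=
  (PySem.List.pyGetD ch cur PySem.Dict.empty).get? c

-- 'for c in reversed(w): nxt = children[cur].get(c); if nxt is None: children.append({});
--  terminal.append(False); nxt = len(children)-1; children[cur][c] = nxt; cur = nxt'
def insChars : List (PySem.Dict Char Int) → List Bool → Int → List Char →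
    List (PySem.Dict Char Int) × List Bool × Int
  | ch, tm, cur, [] => (ch, tm, cur)
  | ch, tm, cur, c :: cs =>
    match childGet ch cur c with
    | some nxt => insChars ch tm nxt cs
    | none =>
        let n : Int := PySem.List.len (ch ++ [PySem.Dict.empty]) - 1
        insChars
          (PySem.List.pySetD (ch ++ [PySem.Dict.empty]) cur
            ((PySem.List.pyGetD ch cur PySem.Dict.empty).insert c n))
          (tm ++ [false]) n cs

-- one word of the build loop, ending with 'terminal[cur] = True'
def insertWord (ch : List (PySem.Dict Char Int)) (tm : List Bool) (w : String) :
    List (PySem.Dict Char Int) × List Bool :=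
  let r := insChars ch tm 0 w.toList.reverse
  (r.1, PySem.List.pySetD r.2.1 r.2.2 true)

-- 'children = [{}]; terminal = [False]; for w in dict: …'
def buildTrie (dict : List String) : List (PySem.Dict Char Int) × List Bool :=
  dict.foldl (fun t w => insertWord t.1 t.2 w) ([PySem.Dict.empty], [false])

-- 'best = 1; cur = 0; i = 0; while i < wML and end - i >= 0: nxt = children[cur].get(sentence[end-i]);
--  if nxt is None: break; cur = nxt; i += 1; if terminal[cur]: best = i'
-- (fuel wML.toNat+1 covers every iteration: i increases by 1 and the guard needs i < wML;
--  the pyGetD defaults are never read: e - i is a valid index whenever the guard holds)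
def walkAux (ch : List (PySem.Dict Char Int)) (tm : List Bool) (s : List Char) (wML e : Int) :
    Nat → Int → Int → Int → Int
  | 0, _, _, best => best
  | fuel + 1, cur, i, best =>
    if i < wML ∧ e - i ≥ 0 then
      match childGet ch cur (PySem.List.pyGetD s (e - i) ' ') with
      | none => best
      | some nxt =>
          walkAux ch tm s wML e fuel nxt (i + 1)
            (if PySem.List.pyGetD tm nxt false then i + 1 else best)
    else best

-- 'while end >= 0: …; out.append(sentence[end-best+1:end+1]); end -= best'
-- (fuel only makes the loop total: best ≥ 1 on every pass, so len(s)+1 passes always suffice)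
def segLoop (ch : List (PySem.Dict Char Int)) (tm : List Bool) (s : List Char) (wML : Int) :
    Nat → Int → List String → List String
  | 0, _, out => out
  | fuel + 1, e, out =>
    if e ≥ 0 then
      let best := walkAux ch tm s wML e (wML.toNat + 1) 0 0 1
      segLoop ch tm s wML fuel (e - best) (out ++ [segSlice s (e - best + 1) (e + 1)])
    else out

def backwardSeg_alt (dict : List String) (sentence : String) (wordMaxLength : Int) : List String :=
  let t := buildTrie dict
  let s := sentence.toList
  (segLoop t.1 t.2 s wordMaxLength (s.length + 1) ((s.length : Int) - 1) []).reverse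

-- ===== PRECONDITION & SPEC =====
-- Pre_ excludes only inputs on which A never returns: on a nonempty sentence with wordMaxLength < 1 the
-- inner 'for' iterates over an empty range, so A's while loop spins forever (A diverges, no value to match).
def Pre_backwardSeg (dict : List String) (sentence : String) (wordMaxLength : Int) : Prop :=
  sentence = "" ∨ 1 ≤ wordMaxLength

instance (dict : List String) (sentence : String) (wordMaxLength : Int) : Decidable (Pre_backwardSeg dict sentence wordMaxLength) := by
  unfold Pre_backwardSeg; infer_instance

def pvWitness_backwardSeg : List String × String × Int := (["ab", "c"], "abc", 2)

def Spec_backwardSeg (dict : List String) (sentence : String) (wordMaxLength : Int) (out : List String) : Prop := out = backwardSeg_alt dict sentence wordMaxLength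
instance (dict : List String) (sentence : String) (wordMaxLength : Int) (out : List String) : Decidable (Spec_backwardSeg dict sentence wordMaxLength out) := by unfold Spec_backwardSeg; infer_instance

-- ===== CLAIM (what is proved, stated in full; the proofs are below) =====
def Claim_equal_backwardSeg : Prop := ∀ (dict : List String) (sentence : String) (wordMaxLength : Int), Dom_backwardSeg dict sentence wordMaxLength → Pre_backwardSeg dict sentence wordMaxLength → Spec_backwardSeg dict sentence wordMaxLength (backwardSeg dict sentence wordMaxLength)

-- ===== LEMMAS AND PROOFS =====

def reachT (ch : List (PySem.Dict Char Int)) : Int → List Char → Option Int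
  | cur, [] => some cur
  | cur, c :: cs =>
    match childGet ch cur c with
    | some nxt => reachT ch nxt cs
    | none => none

def acceptsT (ch : List (PySem.Dict Char Int)) (tm : List Bool) (cs : List Char) : Bool :=
  match reachT ch 0 cs with
  | some j => PySem.List.pyGetD tm j false
  | none => false

def EdgeT (ch : List (PySem.Dict Char Int)) (p : Int) (c : Char) (j : Int) : Prop :=
  0 ≤ p ∧ p < (ch.length : Int) ∧ childGet ch p c = some j

def WFT (ch : List (PySem.Dict Char Int)) : Prop :=
  0 < ch.length ∧
  (∀ p c j, EdgeT ch p c j → 0 < j ∧ j < (ch.length : Int)) ∧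
  (∀ p c p' c' j, EdgeT ch p c j → EdgeT ch p' c' j → p = p' ∧ c = c')

theorem reach_range (ch : List (PySem.Dict Char Int)) (hwf : WFT ch) :
    ∀ (cs : List Char) (cur j : Int), 0 ≤ cur → cur < (ch.length : Int) →
    reachT ch cur cs = some j → 0 ≤ j ∧ j < (ch.length : Int) := by
  intro cs
  induction cs with
  | nil => intro cur j h0 h1 hr; simp [reachT] at hr; omega
  | cons c cs ih =>
    intro cur j h0 h1 hr
    simp only [reachT] at hr
    rcases hc : childGet ch cur c with _ | nxt
    · rw [hc] at hr; simp at hr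
    · rw [hc] at hr
      have hedge := hwf.2.1 cur c nxt ⟨h0, h1, hc⟩
      exact ih nxt j (by omega) hedge.2 hr

theorem reach_append (ch : List (PySem.Dict Char Int)) :
    ∀ (p q : List Char) (cur : Int),
    reachT ch cur (p ++ q) = (reachT ch cur p).bind (fun m => reachT ch m q) := by
  intro p
  induction p with
  | nil => intro q cur; simp [reachT]
  | cons c p ih =>
    intro q cur
    simp only [List.cons_append, reachT]
    rcases hc : childGet ch cur c with _ | nxt
    · simp
    · exact ih q nxt

theorem reach_inj (ch : List (PySem.Dict Char Int)) (hwf : WFT ch) :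
    ∀ (cs1 cs2 : List Char) (j : Int),
    reachT ch 0 cs1 = some j → reachT ch 0 cs2 = some j → cs1 = cs2 := by
  intro cs1
  induction cs1 using List.reverseRecOn with
  | nil =>
    intro cs2 j h1 h2
    simp [reachT] at h1
    subst h1
    induction cs2 using List.reverseRecOn with
    | nil => rfl
    | append_singleton q c _ =>
      rw [reach_append] at h2
      rcases hq : reachT ch 0 q with _ | m
      · rw [hq] at h2; simp at h2
      · rw [hq] at h2
        simp only [Option.bind_some] at h2
        simp only [reachT] at h2
        rcases hc : childGet ch m c with _ | nxt
        · rw [hc] at h2; simp [reachT] at h2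
        · rw [hc] at h2; simp [reachT] at h2
          have hm := reach_range ch hwf q 0 m (le_refl 0) (by exact_mod_cast hwf.1) hq
          have := hwf.2.1 m c nxt ⟨hm.1, hm.2, hc⟩
          omega
  | append_singleton q1 c1 ih =>
    intro cs2 j h1 h2
    rw [reach_append] at h1
    rcases hq1 : reachT ch 0 q1 with _ | m1
    · rw [hq1] at h1; simp at h1
    · rw [hq1] at h1
      simp only [Option.bind_some, reachT] at h1
      rcases hc1 : childGet ch m1 c1 with _ | n1
      · rw [hc1] at h1; simp [reachT] at h1
      · rw [hc1] at h1; simp [reachT] at h1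
        subst h1
        have hm1 := reach_range ch hwf q1 0 m1 (le_refl 0) (by exact_mod_cast hwf.1) hq1
        have hedge1 : EdgeT ch m1 c1 n1 := ⟨hm1.1, hm1.2, hc1⟩
        induction cs2 using List.reverseRecOn with
        | nil =>
          simp [reachT] at h2
          have := hwf.2.1 m1 c1 n1 hedge1
          omega
        | append_singleton q2 c2 _ =>
          rw [reach_append] at h2
          rcases hq2 : reachT ch 0 q2 with _ | m2
          · rw [hq2] at h2; simp at h2
          · rw [hq2] at h2
            simp only [Option.bind_some, reachT] at h2
            rcases hc2 : childGet ch m2 c2 with _ | n2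
            · rw [hc2] at h2; simp at h2
            · rw [hc2] at h2; simp at h2
              subst h2
              have hm2 := reach_range ch hwf q2 0 m2 (le_refl 0) (by exact_mod_cast hwf.1) hq2
              have hedge2 : EdgeT ch m2 c2 n2 := ⟨hm2.1, hm2.2, hc2⟩
              obtain ⟨hpe, hce⟩ := hwf.2.2 m1 c1 m2 c2 n2 hedge1 hedge2
              subst hpe; subst hce
              rw [ih q2 m1 hq1 hq2]

def extendCh (ch : List (PySem.Dict Char Int)) (cur : Int) (c : Char) : List (PySem.Dict Char Int) :=
  (ch ++ [PySem.Dict.empty]).set cur.toNat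
    ((PySem.List.pyGetD ch cur PySem.Dict.empty).insert c (ch.length : Int))

theorem length_extendCh (ch : List (PySem.Dict Char Int)) (cur : Int) (c : Char) :
    (extendCh ch cur c).length = ch.length + 1 := by
  simp [extendCh]

theorem pyGetD_high {α : Type} (xs : List α) (q : Int) (d : α) (h : (xs.length : Int) ≤ q) :
    PySem.List.pyGetD xs q d = d := by
  apply PySem.List.pyGetD_of_none
  rw [PySem.List.pyGet?_eq_none_iff]
  intro hin
  have : q < (xs.length : Int) := by
    have := hin
    simp [PySem.Raise.InRange] at this
    omega
  omega

theorem childGet_extendCh (ch : List (PySem.Dict Char Int)) (cur : Int) (c : Char)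
    (h0 : 0 ≤ cur) (h1 : cur < (ch.length : Int)) (q : Int) (c' : Char) (hq : 0 ≤ q) :
    childGet (extendCh ch cur c) q c' =
      if q = cur ∧ c' = c then some (ch.length : Int)
      else if q = (ch.length : Int) then none
      else childGet ch q c' := by
  by_cases hqr : q < (ch.length : Int) + 1
  · unfold childGet
    rw [PySem.List.pyGetD_eq_getElem _ _ hq (by rw [length_extendCh]; push_cast; omega)]
    unfold extendCh
    rw [List.getElem_set]
    by_cases hqc : q = cur
    · subst hqc
      rw [if_pos rfl]
      rw [PySem.Dict.get?_insert]
      by_cases hcc : c' = c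
      · rw [if_pos hcc, if_pos ⟨rfl, hcc⟩]
      · simp only [hcc, and_false, if_false, if_neg hcc,
          show ¬ q = (ch.length : Int) by omega]
    · rw [if_neg (by omega : ¬ cur.toNat = q.toNat)]
      rw [if_neg (by tauto)]
      by_cases hqn : q = (ch.length : Int)
      · rw [if_pos hqn]
        rw [List.getElem_append_right (show ch.length ≤ q.toNat by omega)]
        simp
      · rw [if_neg hqn]
        have hql : q.toNat < ch.length := by omega
        rw [List.getElem_append_left hql]
        rw [PySem.List.pyGetD_eq_getElem _ _ hq (by omega)]
  · rw [if_neg (by omega), if_neg (by omega)]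
    unfold childGet
    rw [pyGetD_high _ _ _ (by rw [length_extendCh]; push_cast; omega)]
    rw [pyGetD_high _ _ _ (by omega)]

theorem edge_extendCh_iff (ch : List (PySem.Dict Char Int)) (cur : Int) (c : Char)
    (h0 : 0 ≤ cur) (h1 : cur < (ch.length : Int)) (hc : childGet ch cur c = none)
    (p : Int) (c' : Char) (j : Int) :
    EdgeT (extendCh ch cur c) p c' j ↔
      ((p = cur ∧ c' = c ∧ j = (ch.length : Int)) ∨ EdgeT ch p c' j) := by
  have hL := length_extendCh ch cur c
  constructor
  · rintro ⟨hp0, hp1, hcg⟩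
    rw [childGet_extendCh ch cur c h0 h1 p c' hp0] at hcg
    split_ifs at hcg with hA hB
    · injection hcg with h
      exact Or.inl ⟨hA.1, hA.2, h.symm⟩
    · exact Or.inr ⟨hp0, by push_cast [hL] at hp1; omega, hcg⟩
  · rintro (⟨rfl, rfl, rfl⟩ | ⟨hp0, hp1, hcg⟩)
    · refine ⟨h0, by push_cast [hL]; omega, ?_⟩
      rw [childGet_extendCh ch p c' h0 h1 _ _ h0, if_pos ⟨rfl, rfl⟩]
    · refine ⟨hp0, by push_cast [hL]; omega, ?_⟩
      rw [childGet_extendCh ch cur c h0 h1 _ _ hp0]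
      rw [if_neg ?_, if_neg (by omega)]
      · exact hcg
      · rintro ⟨rfl, rfl⟩
        rw [hc] at hcg; exact absurd hcg (by simp)

theorem WFT_extendCh (ch : List (PySem.Dict Char Int)) (cur : Int) (c : Char)
    (hwf : WFT ch) (h0 : 0 ≤ cur) (h1 : cur < (ch.length : Int))
    (hc : childGet ch cur c = none) :
    WFT (extendCh ch cur c) := by
  obtain ⟨hpos, hrange, huniq⟩ := hwf
  have hL := length_extendCh ch cur c
  refine ⟨by omega, ?_, ?_⟩
  · intro p c' j he
    rw [edge_extendCh_iff ch cur c h0 h1 hc] at he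
    rcases he with ⟨rfl, rfl, rfl⟩ | he
    · push_cast [hL]; omega
    · have := hrange p c' j he
      push_cast [hL]; omega
  · intro p c' p' c'' j he he'
    rw [edge_extendCh_iff ch cur c h0 h1 hc] at he he'
    rcases he with ⟨rfl, rfl, rfl⟩ | he <;> rcases he' with ⟨hp', hc'', hj'⟩ | he'
    · exact ⟨hp'.symm, hc''.symm⟩
    · exact absurd (hrange _ _ _ he').2 (lt_irrefl _)
    · have h2 := (hrange _ _ _ he).2
      rw [hj'] at h2
      exact absurd h2 (lt_irrefl _)
    · exact huniq _ _ _ _ _ he he'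

theorem reach_extend_preserve (ch : List (PySem.Dict Char Int)) (cur : Int) (c : Char)
    (hwf : WFT ch) (h0 : 0 ≤ cur) (h1 : cur < (ch.length : Int)) (hc : childGet ch cur c = none) :
    ∀ (cs : List Char) (m j : Int), 0 ≤ m → m < (ch.length : Int) →
    reachT ch m cs = some j → reachT (extendCh ch cur c) m cs = some j := by
  intro cs
  induction cs with
  | nil => intro m j _ _ hr; simpa [reachT] using hr
  | cons c0 cs ih =>
    intro m j hm0 hm1 hr
    simp only [reachT] at hr ⊢
    rcases hg : childGet ch m c0 with _ | nxt
    · rw [hg] at hr; simp at hr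
    · rw [hg] at hr
      have hcg1 : childGet (extendCh ch cur c) m c0 = some nxt := by
        rw [childGet_extendCh ch cur c h0 h1 m c0 hm0]
        rw [if_neg ?_, if_neg (by omega)]
        · exact hg
        · rintro ⟨rfl, rfl⟩; rw [hc] at hg; simp at hg
      rw [hcg1]
      have hedge := hwf.2.1 m c0 nxt ⟨hm0, hm1, hg⟩
      exact ih nxt j (by omega) hedge.2 hr

theorem reach_extend_reflect (ch : List (PySem.Dict Char Int)) (cur : Int) (c : Char)
    (p : List Char)
    (hwf : WFT ch) (h0 : 0 ≤ cur) (h1 : cur < (ch.length : Int)) (hc : childGet ch cur c = none)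
    (hp : reachT ch 0 p = some cur) :
    ∀ (cs q : List Char) (m j : Int), reachT ch 0 q = some m → 0 ≤ m → m < (ch.length : Int) →
    reachT (extendCh ch cur c) m cs = some j →
    reachT ch m cs = some j ∨ (j = (ch.length : Int) ∧ q ++ cs = p ++ [c]) := by
  intro cs
  induction cs with
  | nil => intro q m j _ _ _ hr; left; simpa [reachT] using hr
  | cons c0 cs ih =>
    intro q m j hq hm0 hm1 hr
    simp only [reachT] at hr
    rw [childGet_extendCh ch cur c h0 h1 m c0 hm0] at hr
    by_cases hA : m = cur ∧ c0 = c
    · rw [if_pos hA] at hr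
      obtain ⟨rfl, rfl⟩ := hA
      have hstop : ∀ c'', childGet (extendCh ch m c0) (ch.length : Int) c'' = none := by
        intro c''
        rw [childGet_extendCh ch m c0 h0 h1 _ c'' (by positivity), if_neg (by omega), if_pos rfl]
      cases cs with
      | nil =>
        right
        simp only [reachT] at hr
        refine ⟨(Option.some_inj.mp hr).symm, ?_⟩
        have : q = p := reach_inj ch hwf q p m hq hp
        rw [this]
      | cons c1 cs' =>
        simp [reachT, hstop c1] at hr
    · rw [if_neg hA, if_neg (by omega)] at hr
      rcases hg : childGet ch m c0 with _ | nxt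
      · rw [hg] at hr; simp at hr
      · rw [hg] at hr
        have hedge := hwf.2.1 m c0 nxt ⟨hm0, hm1, hg⟩
        have hq' : reachT ch 0 (q ++ [c0]) = some nxt := by
          rw [reach_append, hq]
          simp [reachT, hg]
        rcases ih (q ++ [c0]) nxt j hq' (by omega) hedge.2 hr with hl | ⟨hj, hqq⟩
        · left; simp only [reachT, hg]; exact hl
        · right
          refine ⟨hj, ?_⟩
          rw [← hqq]; simp

theorem reach_extendCh_new (ch : List (PySem.Dict Char Int)) (cur : Int) (c : Char)
    (p : List Char)
    (hwf : WFT ch) (h0 : 0 ≤ cur) (h1 : cur < (ch.length : Int)) (hc : childGet ch cur c = none)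
    (hp : reachT ch 0 p = some cur) :
    reachT (extendCh ch cur c) 0 (p ++ [c]) = some (ch.length : Int) := by
  have hp1 : reachT (extendCh ch cur c) 0 p = some cur :=
    reach_extend_preserve ch cur c hwf h0 h1 hc p 0 cur (le_refl 0) (by exact_mod_cast hwf.1) hp
  rw [reach_append, hp1]
  simp only [Option.bind_some, reachT]
  rw [childGet_extendCh ch cur c h0 h1 cur c h0, if_pos ⟨rfl, rfl⟩]

theorem accepts_extend (ch : List (PySem.Dict Char Int)) (tm : List Bool) (cur : Int) (c : Char)
    (p : List Char)
    (hwf : WFT ch) (hlen : ch.length = tm.length)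
    (h0 : 0 ≤ cur) (h1 : cur < (ch.length : Int)) (hc : childGet ch cur c = none)
    (hp : reachT ch 0 p = some cur) :
    ∀ cs, acceptsT (extendCh ch cur c) (tm ++ [false]) cs = acceptsT ch tm cs := by
  intro cs
  have hlen' : (ch.length : Int) = (tm.length : Int) := by exact_mod_cast hlen
  unfold acceptsT
  rcases hr : reachT (extendCh ch cur c) 0 cs with _ | j
  · rcases hr' : reachT ch 0 cs with _ | j'
    · rfl
    · have := reach_extend_preserve ch cur c hwf h0 h1 hc cs 0 j' (le_refl 0)
        (by exact_mod_cast hwf.1) hr'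
      rw [this] at hr; simp at hr
  · rcases reach_extend_reflect ch cur c p hwf h0 h1 hc hp cs [] 0 j rfl (le_refl 0)
      (by exact_mod_cast hwf.1) hr with hl | ⟨hj, hcs⟩
    · rw [hl]
      dsimp only
      have hjr := reach_range ch hwf cs 0 j (le_refl 0) (by exact_mod_cast hwf.1) hl
      rw [PySem.List.pyGetD_eq_getElem _ _ hjr.1 (by simp only [List.length_append, List.length_cons, List.length_nil]; push_cast; omega),
          PySem.List.pyGetD_eq_getElem _ _ hjr.1 (by rw [← hlen]; exact hjr.2)]
      rw [List.getElem_append_left (by omega)]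
    · subst hj
      simp only [List.nil_append] at hcs
      subst hcs
      have hnone : reachT ch 0 (p ++ [c]) = none := by
        rw [reach_append, hp]
        simp [reachT, hc]
      rw [hnone]
      dsimp only
      rw [PySem.List.pyGetD_eq_getElem _ _ (by positivity) (by simp only [List.length_append, List.length_cons, List.length_nil]; push_cast; omega)]
      rw [List.getElem_append_right (by omega)]
      simp [hlen]

theorem insChars_spec (u : List Char) :
    ∀ (ch : List (PySem.Dict Char Int)) (tm : List Bool) (p : List Char) (cur : Int),
    WFT ch → ch.length = tm.length → reachT ch 0 p = some cur →
    WFT (insChars ch tm cur u).1 ∧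
    (insChars ch tm cur u).1.length = (insChars ch tm cur u).2.1.length ∧
    reachT (insChars ch tm cur u).1 0 (p ++ u) = some (insChars ch tm cur u).2.2 ∧
    (∀ cs, acceptsT (insChars ch tm cur u).1 (insChars ch tm cur u).2.1 cs = acceptsT ch tm cs) := by
  induction u with
  | nil =>
    intro ch tm p cur hwf hlen hp
    exact ⟨hwf, hlen, by simpa [insChars] using hp, fun cs => rfl⟩
  | cons c u ih =>
    intro ch tm p cur hwf hlen hp
    have hcur := reach_range ch hwf p 0 cur (le_refl 0) (by exact_mod_cast hwf.1) hp
    rcases hc : childGet ch cur c with _ | nxt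
    · -- new node: the recursion continues on the extended trie
      have heq : insChars ch tm cur (c :: u)
          = insChars (extendCh ch cur c) (tm ++ [false]) (ch.length : Int) u := by
        simp only [insChars, hc]
        congr 1
        · rw [PySem.List.pySetD_of_nonneg _ _ hcur.1]
          unfold extendCh
          congr 1
          simp [PySem.List.len_eq]
        · simp [PySem.List.len_eq]
      rw [heq]
      have hwf1 := WFT_extendCh ch cur c hwf hcur.1 hcur.2 hc
      have hlen1 : (extendCh ch cur c).length = (tm ++ [false]).length := by
        rw [length_extendCh]; simp [hlen]
      have hp1 := reach_extendCh_new ch cur c p hwf hcur.1 hcur.2 hc hp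
      have hrec := ih (extendCh ch cur c) (tm ++ [false]) (p ++ [c]) (ch.length : Int)
        hwf1 hlen1 hp1
      refine ⟨hrec.1, hrec.2.1, ?_, ?_⟩
      · rw [show p ++ c :: u = (p ++ [c]) ++ u by simp]
        exact hrec.2.2.1
      · intro cs
        rw [hrec.2.2.2 cs]
        exact accepts_extend ch tm cur c p hwf hlen hcur.1 hcur.2 hc hp cs
    · -- existing edge
      have heq : insChars ch tm cur (c :: u) = insChars ch tm nxt u := by
        simp only [insChars, hc]
      rw [heq]
      have hp' : reachT ch 0 (p ++ [c]) = some nxt := by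
        rw [reach_append, hp]
        simp [reachT, hc]
      have hrec := ih ch tm (p ++ [c]) nxt hwf hlen hp'
      refine ⟨hrec.1, hrec.2.1, ?_, hrec.2.2.2⟩
      rw [show p ++ c :: u = (p ++ [c]) ++ u by simp]
      exact hrec.2.2.1

theorem insertWord_spec (ch : List (PySem.Dict Char Int)) (tm : List Bool) (w : String)
    (hwf : WFT ch) (hlen : ch.length = tm.length) :
    WFT (insertWord ch tm w).1 ∧
    (insertWord ch tm w).1.length = (insertWord ch tm w).2.length ∧
    (∀ cs, acceptsT (insertWord ch tm w).1 (insertWord ch tm w).2 cs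
      = (acceptsT ch tm cs || cs == w.toList.reverse)) := by
  have hspec := insChars_spec w.toList.reverse ch tm [] 0 hwf hlen (by simp [reachT])
  set r := insChars ch tm 0 w.toList.reverse with hr
  obtain ⟨hwf1, hlen1, hreach, hacc⟩ := hspec
  simp only [List.nil_append] at hreach
  have hcr := reach_range r.1 hwf1 w.toList.reverse 0 r.2.2 (le_refl 0)
    (by exact_mod_cast hwf1.1) hreach
  refine ⟨hwf1, ?_, ?_⟩
  · simp only [insertWord]
    rw [← hr, PySem.List.pySetD_of_nonneg _ _ hcr.1]
    simp [hlen1]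
  · intro cs
    simp only [insertWord]
    rw [← hr, PySem.List.pySetD_of_nonneg _ _ hcr.1]
    rcases hrc : reachT r.1 0 cs with _ | j
    · have hne : cs ≠ w.toList.reverse := by
        intro h; rw [h, hreach] at hrc; simp at hrc
      have hl : acceptsT r.1 (r.2.1.set r.2.2.toNat true) cs = false := by
        unfold acceptsT; rw [hrc]
      have hrr : acceptsT ch tm cs = false := by
        rw [← hacc cs]; unfold acceptsT; rw [hrc]
      rw [hl, hrr]; simp [hne]
    · have hjr := reach_range r.1 hwf1 cs 0 j (le_refl 0) (by exact_mod_cast hwf1.1) hrc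
      by_cases hj : j = r.2.2
      · subst hj
        have hcs : cs = w.toList.reverse := reach_inj r.1 hwf1 cs _ _ hrc hreach
        have hl : acceptsT r.1 (r.2.1.set r.2.2.toNat true) cs = true := by
          unfold acceptsT; rw [hrc]
          dsimp only
          rw [PySem.List.pyGetD_eq_getElem _ _ hjr.1 (by simp only [List.length_set]; omega)]
          rw [List.getElem_set, if_pos rfl]
        rw [hl]; simp [hcs]
      · have hcs : cs ≠ w.toList.reverse := by
          intro h; rw [h, hreach] at hrc
          exact hj (Option.some_inj.mp hrc).symm
        have hl : acceptsT r.1 (r.2.1.set r.2.2.toNat true) cs = acceptsT ch tm cs := by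
          rw [← hacc cs]
          unfold acceptsT; rw [hrc]
          dsimp only
          rw [PySem.List.pyGetD_eq_getElem _ _ hjr.1 (by simp only [List.length_set]; omega),
              PySem.List.pyGetD_eq_getElem _ _ hjr.1 (by omega)]
          rw [List.getElem_set, if_neg (by omega)]
        rw [hl]; simp [hcs]

theorem build_fold (ws : List String) :
    ∀ (t : List (PySem.Dict Char Int) × List Bool), WFT t.1 → t.1.length = t.2.length →
    WFT (ws.foldl (fun t w => insertWord t.1 t.2 w) t).1 ∧
    (ws.foldl (fun t w => insertWord t.1 t.2 w) t).1.length
      = (ws.foldl (fun t w => insertWord t.1 t.2 w) t).2.length ∧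
    (∀ cs, acceptsT (ws.foldl (fun t w => insertWord t.1 t.2 w) t).1
        (ws.foldl (fun t w => insertWord t.1 t.2 w) t).2 cs
      = (acceptsT t.1 t.2 cs || ws.any (fun w => cs == w.toList.reverse))) := by
  induction ws with
  | nil => intro t hwf hlen; exact ⟨hwf, hlen, by simp⟩
  | cons w ws ih =>
    intro t hwf hlen
    have hw := insertWord_spec t.1 t.2 w hwf hlen
    have hrec := ih (insertWord t.1 t.2 w) hw.1 hw.2.1
    simp only [List.foldl_cons]
    refine ⟨hrec.1, hrec.2.1, ?_⟩
    intro cs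
    rw [hrec.2.2 cs, hw.2.2 cs]
    simp [Bool.or_assoc]

theorem WFT_base : WFT [PySem.Dict.empty] := by
  refine ⟨by simp, ?_, ?_⟩
  · rintro p c j ⟨hp0, hp1, hcg⟩
    simp only [List.length_cons, List.length_nil] at hp1
    have hp : p = 0 := by omega
    subst hp
    rw [childGet, PySem.List.pyGetD_eq_getElem _ _ (le_refl 0) (by simp)] at hcg
    simp [PySem.Dict.get?_empty] at hcg
  · rintro p c p' c' j ⟨hp0, hp1, hcg⟩ _
    simp only [List.length_cons, List.length_nil] at hp1
    have hp : p = 0 := by omega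
    subst hp
    rw [childGet, PySem.List.pyGetD_eq_getElem _ _ (le_refl 0) (by simp)] at hcg
    simp [PySem.Dict.get?_empty] at hcg

theorem accepts_base (cs : List Char) : acceptsT [PySem.Dict.empty] [false] cs = false := by
  cases cs with
  | nil => rfl
  | cons c cs =>
    unfold acceptsT reachT
    rw [childGet, PySem.List.pyGetD_eq_getElem _ _ (le_refl 0) (by simp)]
    simp [PySem.Dict.get?_empty]

theorem buildTrie_spec (dict : List String) :
    WFT (buildTrie dict).1 ∧
    (buildTrie dict).1.length = (buildTrie dict).2.length ∧
    (∀ cs, acceptsT (buildTrie dict).1 (buildTrie dict).2 cs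
      = dict.any (fun w => cs == w.toList.reverse)) := by
  have h := build_fold dict ([PySem.Dict.empty], [false]) WFT_base (by simp)
  refine ⟨h.1, h.2.1, ?_⟩
  intro cs
  rw [buildTrie]
  rw [h.2.2 cs, accepts_base]
  simp

def readChars (s : List Char) (e : Int) : Nat → List Char
  | 0 => []
  | i + 1 => readChars s e i ++ [PySem.List.pyGetD s (e - i) ' ']

theorem readChars_reverse (s : List Char) (e : Int) (he : e < (s.length : Int)) :
    ∀ (i : Nat), (i : Int) ≤ e + 1 →
    PySem.List.slice s (some (e + 1 - i)) (some (e + 1)) = (readChars s e i).reverse := by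
  intro i
  induction i with
  | zero =>
    intro h
    rw [PySem.List.slice_toNat _ (by omega) (by omega)]
    simp [readChars]
  | succ i ih =>
    intro h
    have h0 : (0:Int) ≤ e - i := by push_cast at h ⊢; omega
    have hk : (e - i).toNat < s.length := by omega
    rw [show (e + 1 - (i + 1 : Nat)) = e - i by push_cast; ring]
    rw [PySem.List.slice_toNat _ h0 (by omega)]
    rw [List.drop_eq_getElem_cons hk]
    rw [show ((e+1).toNat - (e - i).toNat) = i + 1 by omega]
    rw [List.take_succ_cons]
    simp only [readChars, List.reverse_append, List.reverse_cons, List.reverse_nil,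
      List.nil_append, List.singleton_append]
    rw [PySem.List.pyGetD_eq_getElem _ _ h0 (by omega)]
    congr 1
    have := ih (by push_cast at h ⊢; omega)
    rw [PySem.List.slice_toNat _ (by omega) (by omega)] at this
    rw [show ((e+1).toNat - (e + 1 - i).toNat) = i by omega] at this
    rw [← this]
    congr 2
    omega

theorem readChars_split (s : List Char) (e : Int) :
    ∀ (b a : Nat), a ≤ b → ∃ t, readChars s e b = readChars s e a ++ t := by
  intro b
  induction b with
  | zero => intro a ha; exact ⟨[], by simp [show a = 0 by omega, readChars]⟩
  | succ b ih =>
    intro a ha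
    by_cases hab : a = b + 1
    · exact ⟨[], by simp [hab]⟩
    · obtain ⟨t, ht⟩ := ih a (by omega)
      exact ⟨t ++ [PySem.List.pyGetD s (e - b) ' '], by
        simp only [readChars, ht, List.append_assoc]⟩

theorem walk_spec (ch : List (PySem.Dict Char Int)) (tm : List Bool) (s : List Char)
    (wML e : Int) :
    ∀ (fuel : Nat) (cur i best : Int), 0 ≤ i →
    (min wML (e + 1) - i).toNat ≤ fuel →
    reachT ch 0 (readChars s e i.toNat) = some cur →
    walkAux ch tm s wML e fuel cur i best
      = (PySem.List.pyRange (i + 1) (min wML (e + 1) + 1) 1).foldl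
          (fun b j => if acceptsT ch tm (readChars s e j.toNat) then j else b) best := by
  intro fuel
  induction fuel with
  | zero =>
    intro cur i best hi hfuel _
    rw [PySem.List.pyRange_one_eq_nil (by omega)]
    rfl
  | succ fuel ih =>
    intro cur i best hi hfuel hreach
    by_cases hg : i < wML ∧ e - i ≥ 0
    · have hiplus : ((i + 1).toNat) = i.toNat + 1 := by omega
      have hrc' : reachT ch 0 (readChars s e (i.toNat + 1))
          = match childGet ch cur (PySem.List.pyGetD s (e - i) ' ') with
            | some nxt => some nxt
            | none => none := by
        simp only [readChars]
        rw [reach_append, hreach]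
        simp only [Option.bind_some, reachT]
        rw [show ((i.toNat : Int)) = i by omega]
      rw [PySem.List.pyRange_one_cons (by omega)]
      simp only [walkAux, if_pos hg, List.foldl_cons]
      rcases hcg : childGet ch cur (PySem.List.pyGetD s (e - i) ' ') with _ | nxt
      · -- the walk dies: nothing longer is accepted
        rw [hcg] at hrc'
        have hdead : ∀ (j : Int), i + 1 ≤ j →
            acceptsT ch tm (readChars s e j.toNat) = false := by
          intro j hj
          obtain ⟨t, ht⟩ := readChars_split s e j.toNat (i.toNat + 1) (by omega)
          unfold acceptsT
          rw [ht, reach_append, hrc']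
          rfl
        have hd1 := hdead (i + 1) (le_refl _)
        dsimp only
        rw [if_neg (by simp [hd1])]
        have hcong := PySem.List.foldl_congr_mem
          (l := PySem.List.pyRange (i + 1 + 1) (min wML (e + 1) + 1) 1)
          (f := fun b j => if acceptsT ch tm (readChars s e j.toNat) = true then j else b)
          (g := fun b j => b) (init := best)
          (by intro acc x hx
              dsimp only
              rw [hdead x (by have := (PySem.List.mem_pyRange_one).mp hx; omega)]
              simp)
        rw [hcong, PySem.List.foldl_ignore]
      · rw [hcg] at hrc'
        have hacc1 : acceptsT ch tm (readChars s e (i + 1).toNat)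
            = PySem.List.pyGetD tm nxt false := by
          unfold acceptsT
          rw [hiplus, hrc']
        rw [hacc1]
        dsimp only
        exact ih nxt (i + 1) _ (by omega) (by omega) (by rw [hiplus]; exact hrc')
    · simp only [walkAux, if_neg hg]
      rw [PySem.List.pyRange_one_eq_nil (by omega)]
      rfl

theorem find_core (dict : List String) (s : List Char) (e : Int) :
    ∀ (k : Nat) (M : Int), M = 1 + k → M ≤ e + 1 →
    (PySem.List.pyRange M 0 (-1)).find?
      (fun i => (decide (e - i + 1 ≥ 0) && decide (segSlice s (e - i + 1) (e + 1) ∈ dict)) || i == 1)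
      = some ((PySem.List.pyRange 2 (M + 1) 1).foldl
          (fun best i => if segSlice s (e + 1 - i) (e + 1) ∈ dict then i else best) 1) := by
  intro k
  induction k with
  | zero =>
    intro M hM hMe
    have hM1 : M = 1 := by simpa using hM
    subst hM1
    rw [PySem.List.pyRange_neg_one_cons (a := 1) (b := 0) (by norm_num)]
    norm_num
  | succ k ih =>
    intro M hM hMe
    have h2 : (2:Int) ≤ M := by omega
    rw [PySem.List.pyRange_neg_one_cons (a := M) (b := 0) (by omega)]
    have hsplit : PySem.List.pyRange 2 (M + 1) 1 = PySem.List.pyRange 2 M 1 ++ [M] := by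
      simpa using PySem.List.pyRange_one_succ_right (a := 2) (b := M) (by omega)
    rw [hsplit, List.foldl_append]
    by_cases hm : segSlice s (e - M + 1) (e + 1) ∈ dict
    · rw [List.find?_cons_of_pos]
      · have hmem : segSlice s (e + 1 - M) (e + 1) ∈ dict := by
          have : e + 1 - M = e - M + 1 := by ring
          rw [this]; exact hm
        rw [List.foldl_cons, if_pos hmem, List.foldl_nil]
      · simp only [ge_iff_le, decide_eq_true_eq, Bool.or_eq_true, Bool.and_eq_true]
        left; exact ⟨by omega, hm⟩
    · rw [List.find?_cons_of_neg]
      · have hmem : segSlice s (e + 1 - M) (e + 1) ∉ dict := by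
          have : e + 1 - M = e - M + 1 := by ring
          rw [this]; exact hm
        simp only [List.foldl_cons, if_neg hmem, List.foldl_nil]
        have hrec := ih (M - 1) (by omega) (by omega)
        rw [show M - 1 + 1 = M from by ring] at hrec
        exact hrec
      · simp only [ge_iff_le, decide_eq_true_eq, Bool.or_eq_true, Bool.and_eq_true, not_or, not_and]
        constructor
        · intro _; exact hm
        · simp only [beq_iff_eq]; omega

theorem find_eq_fold (dict : List String) (s : List Char) (wML e : Int)
    (hw : 1 ≤ wML) (he : 0 ≤ e) :
    ((PySem.List.pyRange 1 (wML + 1) 1).reverse).find?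
      (fun i => (decide (e - i + 1 ≥ 0) && decide (segSlice s (e - i + 1) (e + 1) ∈ dict)) || i == 1)
      = some ((PySem.List.pyRange 2 (min wML (e + 1) + 1) 1).foldl
          (fun best i => if segSlice s (e + 1 - i) (e + 1) ∈ dict then i else best) 1) := by
  have hrev : (PySem.List.pyRange 1 (wML + 1) 1).reverse = PySem.List.pyRange wML 0 (-1) := by
    rw [PySem.List.pyRange_neg_one_eq_reverse (a := wML) (b := 0)]
    norm_num
  rw [hrev]
  have hskip : ∀ (j : Nat) (m : Int), m = min wML (e + 1) + j → m ≤ wML →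
      (PySem.List.pyRange m 0 (-1)).find?
        (fun i => (decide (e - i + 1 ≥ 0) && decide (segSlice s (e - i + 1) (e + 1) ∈ dict)) || i == 1)
      = (PySem.List.pyRange (min wML (e + 1)) 0 (-1)).find?
        (fun i => (decide (e - i + 1 ≥ 0) && decide (segSlice s (e - i + 1) (e + 1) ∈ dict)) || i == 1) := by
    intro j
    induction j with
    | zero => intro m hm _; norm_num at hm; rw [hm]
    | succ j ih =>
      intro m hm hmw
      rw [PySem.List.pyRange_neg_one_cons (a := m) (b := 0) (by omega)]
      rw [List.find?_cons_of_neg]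
      · exact ih (m - 1) (by omega) (by omega)
      · simp only [ge_iff_le, decide_eq_true_eq, Bool.or_eq_true, Bool.and_eq_true, not_or,
          beq_iff_eq]
        constructor
        · rintro ⟨h1, -⟩; omega
        · omega
  rw [hskip (wML - min wML (e + 1)).toNat wML (by omega) le_rfl]
  exact find_core dict s e (min wML (e + 1) - 1).toNat (min wML (e + 1)) (by omega) (by omega)

theorem accepts_eq_mem (dict : List String) (s : List Char) (e j : Int)
    (hn : e < (s.length : Int)) (h1 : 1 ≤ j) (hje : j ≤ e + 1) :
    acceptsT (buildTrie dict).1 (buildTrie dict).2 (readChars s e j.toNat)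
      = decide (segSlice s (e + 1 - j) (e + 1) ∈ dict) := by
  rw [(buildTrie_spec dict).2.2]
  have hsl := readChars_reverse s e hn j.toNat (by omega)
  rw [show ((j.toNat : Int)) = j by omega] at hsl
  have hptw : ∀ w : String,
      (readChars s e j.toNat == w.toList.reverse) = (segSlice s (e + 1 - j) (e + 1) == w) := by
    intro w
    simp only [segSlice, hsl]
    rw [Bool.eq_iff_iff]
    simp only [beq_iff_eq]
    constructor
    · intro h
      have : (readChars s e j.toNat).reverse = w.toList := by rw [h]; simp
      rw [this]; simp
    · intro h
      have h2 : (readChars s e j.toNat).reverse = w.toList := by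
        have := congrArg String.toList h
        simpa using this
      rw [← h2]; simp
  calc (dict.any fun w => readChars s e j.toNat == w.toList.reverse)
      = dict.any (fun w => segSlice s (e + 1 - j) (e + 1) == w) := by
        exact PySem.List.any_congr_mem (fun w _ => hptw w)
    _ = dict.contains (segSlice s (e + 1 - j) (e + 1)) := List.any_beq
    _ = decide (segSlice s (e + 1 - j) (e + 1) ∈ dict) := by simp

theorem walk_eq_fold (dict : List String) (s : List Char) (wML e : Int)
    (hw : 1 ≤ wML) (he : 0 ≤ e) (hn : e < (s.length : Int)) :
    walkAux (buildTrie dict).1 (buildTrie dict).2 s wML e (wML.toNat + 1) 0 0 1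
      = (PySem.List.pyRange 2 (min wML (e + 1) + 1) 1).foldl
          (fun best i => if segSlice s (e + 1 - i) (e + 1) ∈ dict then i else best) 1 := by
  rw [walk_spec (buildTrie dict).1 (buildTrie dict).2 s wML e (wML.toNat + 1) 0 0 1
    (le_refl 0) (by omega) (by simp [readChars, reachT])]
  rw [show (0:Int) + 1 = 1 by ring]
  rw [PySem.List.pyRange_one_cons (by omega), List.foldl_cons, ite_self]
  have hcong := PySem.List.foldl_congr_mem
    (l := PySem.List.pyRange 2 (min wML (e + 1) + 1) 1)
    (f := fun b j => if acceptsT (buildTrie dict).1 (buildTrie dict).2 (readChars s e j.toNat) = true then j else b)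
    (g := fun best i => if segSlice s (e + 1 - i) (e + 1) ∈ dict then i else best)
    (init := (1:Int))
    (by intro acc x hx
        have hxm := (PySem.List.mem_pyRange_one).mp hx
        dsimp only
        rw [accepts_eq_mem dict s e x hn (by omega) (by omega)]
        simp)
  exact hcong

theorem fold_ge_one (dict : List String) (s : List Char) (e : Int) :
    ∀ (l : List Int) (b : Int), 1 ≤ b → (∀ x ∈ l, 1 ≤ x) →
    1 ≤ l.foldl (fun best i => if segSlice s (e + 1 - i) (e + 1) ∈ dict then i else best) b := by
  intro l
  induction l with
  | nil => intro b hb _; simpa using hb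
  | cons x l ih =>
    intro b hb hl
    rw [List.foldl_cons]
    apply ih
    · by_cases hm : segSlice s (e + 1 - x) (e + 1) ∈ dict
      · rw [if_pos hm]; exact hl x (by simp)
      · rw [if_neg hm]; exact hb
    · intro y hy; exact hl y (by simp [hy])

theorem loops_agree (dict : List String) (s : List Char) (wML : Int) (hw : 1 ≤ wML) :
    ∀ (fuel : Nat) (e : Int) (out : List String), e < (s.length : Int) →
    aLoop dict s wML fuel e out
      = segLoop (buildTrie dict).1 (buildTrie dict).2 s wML fuel e out := by
  intro fuel
  induction fuel with
  | zero => intro e out _; rfl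
  | succ fuel ih =>
    intro e out hn
    by_cases he : e ≥ 0
    · simp only [aLoop, segLoop, if_pos he]
      rw [find_eq_fold dict s wML e hw he]
      rw [walk_eq_fold dict s wML e hw he hn]
      dsimp only
      set F := (PySem.List.pyRange 2 (min wML (e + 1) + 1) 1).foldl
          (fun best i => if segSlice s (e + 1 - i) (e + 1) ∈ dict then i else best) 1 with hF
      have hF1 : 1 ≤ F := by
        apply fold_ge_one
        · exact le_refl 1
        · intro x hx
          have := (PySem.List.mem_pyRange_one).mp hx
          omega
      exact ih (e - F) _ (by omega)
    · simp only [aLoop, segLoop, if_neg he]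

-- ===== VERDICT (by name: the statement is the Claim_ definition above) =====
theorem backwardSeg_spec : Claim_equal_backwardSeg := by
  intro dict sentence wML _ hpre
  unfold Spec_backwardSeg backwardSeg backwardSeg_alt
  rcases hpre with hemp | hw
  · subst hemp
    simp [aLoop, segLoop]
  · have h := loops_agree dict sentence.toList wML hw (sentence.toList.length + 1)
      ((sentence.toList.length : Int) - 1) [] (by omega)
    simp only []
    rw [h]
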